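-- pv_equiv track=rewrite | github.com/ykdy3951/codetree-TILs | 241219/한 가지로 열리는 자물쇠/one-way-lock.py | count_unlock_combinations
-- ===== SOURCE A (Python) =====
-- def is_within_distance(x, y):
--     return abs(x - y) <= 2
--
-- def count_unlock_combinations(N, a, b, c):
--     count = 0
--
--     for x in range(1, N + 1):
--         for y in range(1, N + 1):
--             for z in range(1, N + 1):
--                 if (
--                     is_within_distance(x, a) or
--                     is_within_distance(y, b) or
--                     is_within_distance(z, c)
--                 ):
--                     count += 1
--
--     return count
-- ===== SOURCE B (Python) =====
-- def count_unlock_combinations(N, a, b, c):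
--     # Complement counting: total triples minus triples where every axis misses,
--     # with per-axis hit counts computed in closed form (O(1) vs A's O(N^3)).
--     n = max(N, 0)
--
--     def miss(t):
--         hit = max(0, min(N, t + 2) - max(1, t - 2) + 1)
--         return n - hit
--
--     return n ** 3 - miss(a) * miss(b) * miss(c)
-- ===== Notes on version B (the rewrite author's own statement) =====
-- stated objective: faster
-- what changed: Replaced the triple nested loop over [1,N]^3 by complement counting: N^3 minus the product of per-axis miss counts, each hit count computed by a closed-form interval intersection.
import Mathlib
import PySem

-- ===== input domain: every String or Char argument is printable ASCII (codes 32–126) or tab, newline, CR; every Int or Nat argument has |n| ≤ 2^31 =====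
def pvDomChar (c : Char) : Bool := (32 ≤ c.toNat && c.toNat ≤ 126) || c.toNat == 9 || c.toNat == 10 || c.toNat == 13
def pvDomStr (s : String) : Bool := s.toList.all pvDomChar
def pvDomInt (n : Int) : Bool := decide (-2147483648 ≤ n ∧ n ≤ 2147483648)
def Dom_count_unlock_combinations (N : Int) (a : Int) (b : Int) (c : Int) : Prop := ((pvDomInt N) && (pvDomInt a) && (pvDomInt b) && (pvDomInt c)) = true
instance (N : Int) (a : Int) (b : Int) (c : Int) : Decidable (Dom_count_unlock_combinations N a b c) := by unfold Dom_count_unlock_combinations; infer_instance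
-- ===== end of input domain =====

-- B replaces A's O(N^3) triple loop by complement counting with closed-form per-axis hit counts (objective: faster, asymptotic).

-- ===== PORT A =====
-- abs(x - y) <= 2
def pvWithin (x y : Int) : Bool := decide ((x - y).natAbs ≤ 2)

def count_unlock_combinations (N : Int) (a : Int) (b : Int) (c : Int) : Int :=
  (PySem.List.pyRange 1 (N + 1) 1).foldl (fun cnt x =>
    (PySem.List.pyRange 1 (N + 1) 1).foldl (fun cnt y =>
      (PySem.List.pyRange 1 (N + 1) 1).foldl (fun cnt z =>
        if pvWithin x a || pvWithin y b || pvWithin z c then cnt + 1 else cnt) cnt) cnt) 0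

-- ===== PORT B =====
-- number of x in [1,N] with |x - t| <= 2, in closed form
def pvHit (N t : Int) : Int := max 0 (min N (t + 2) - max 1 (t - 2) + 1)

def count_unlock_combinations_alt (N : Int) (a : Int) (b : Int) (c : Int) : Int :=
  let n := max N 0
  n ^ 3 - (n - pvHit N a) * (n - pvHit N b) * (n - pvHit N c)

-- ===== PRECONDITION & SPEC =====
def Spec_count_unlock_combinations (N : Int) (a : Int) (b : Int) (c : Int) (out : Int) : Prop := out = count_unlock_combinations_alt N a b c
instance (N : Int) (a : Int) (b : Int) (c : Int) (out : Int) : Decidable (Spec_count_unlock_combinations N a b c out) := by unfold Spec_count_unlock_combinations; infer_instance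

-- ===== CLAIM (what is proved, stated in full; the proofs are below) =====
def Claim_equal_count_unlock_combinations : Prop := ∀ (N : Int) (a : Int) (b : Int) (c : Int), Dom_count_unlock_combinations N a b c → Spec_count_unlock_combinations N a b c (count_unlock_combinations N a b c)

-- ===== LEMMAS AND PROOFS =====

-- folds with pointwise-equal step functions agree
theorem pv_foldl_ext {α β : Type} (f g : β → α → β) (h : ∀ c y, f c y = g c y) :
    ∀ (l : List α) (c : β), l.foldl f c = l.foldl g c := by
  intro l
  induction l with
  | nil => intro c; rfl
  | cons x xs ih => intro c; simp only [List.foldl_cons, h]; exact ih _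

-- counting fold = countP
theorem pv_foldl_count (q : Int → Bool) :
    ∀ (l : List Int) (c : Int),
      l.foldl (fun acc z => if q z then acc + 1 else acc) c = c + l.countP q := by
  intro l
  induction l with
  | nil => intro c; simp
  | cons x xs ih =>
    intro c
    simp only [List.foldl_cons, List.countP_cons, ih]
    by_cases h : q x <;> simp [h] <;> push_cast <;> ring

-- fold accumulating an if-valued sum
theorem pv_foldl_ite_sum (q : Int → Bool) (u v : Int) :
    ∀ (l : List Int) (c : Int),
      l.foldl (fun acc y => acc + (if q y then u else v)) c
        = c + (l.countP q : Int) * u + ((l.length : Int) - (l.countP q : Int)) * v := by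
  intro l
  induction l with
  | nil => intro c; simp
  | cons x xs ih =>
    intro c
    simp only [List.foldl_cons, List.countP_cons, List.length_cons, ih]
    by_cases h : q x <;> simp [h] <;> push_cast <;> ring

theorem pv_countP_or (b : Bool) (p : Int → Bool) (l : List Int) :
    l.countP (fun z => b || p z) = if b then l.length else l.countP p := by
  cases b <;> simp

-- closed form of the per-axis hit count
theorem pv_hit_count (t : Int) : ∀ (n : Nat),
    (((PySem.List.pyRange 1 ((n : Int) + 1) 1).countP (fun z => pvWithin z t) : Int))
      = pvHit (n : Int) t := by
  intro n
  induction n with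
  | zero =>
    rw [PySem.List.pyRange_one_eq_nil (by omega)]
    simp only [pvHit, List.countP_nil]
    omega
  | succ m ih =>
    have h1 : (1 : Int) ≤ (m : Int) + 1 := by omega
    have hcast : ((m : Nat) + 1 : Int) + 1 = ((m : Int) + 1) + 1 := by push_cast; ring
    rw [show (((m + 1 : Nat) : Int) + 1) = ((m : Int) + 1) + 1 by push_cast; ring]
    rw [PySem.List.pyRange_one_succ_right h1, List.countP_append]
    simp only [List.countP_cons, List.countP_nil]
    by_cases h : pvWithin ((m : Int) + 1) t
    · have h' : ((m : Int) + 1 - t).natAbs ≤ 2 := by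
        simpa [pvWithin] using h
      simp only [h, if_true, pvHit] at *
      push_cast
      omega
    · have h' : ¬ ((m : Int) + 1 - t).natAbs ≤ 2 := by
        simpa [pvWithin] using h
      simp only [h, if_false, pvHit] at *
      push_cast
      omega

theorem pv_hit_count_int (N t : Int) :
    (((PySem.List.pyRange 1 (N + 1) 1).countP (fun z => pvWithin z t) : Int)) = pvHit N t := by
  by_cases h : N ≤ 0
  · rw [PySem.List.pyRange_one_eq_nil (by omega)]
    simp only [pvHit, List.countP_nil]
    omega
  · have hN : N = ((N.toNat : Nat) : Int) := by omega
    rw [hN]; exact pv_hit_count t N.toNat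

theorem pv_length_range (N : Int) :
    ((PySem.List.pyRange 1 (N + 1) 1).length : Int) = max N 0 := by
  rw [PySem.List.length_pyRange_one]
  omega

-- ===== VERDICT (by name: the statement is the Claim_ definition above) =====
theorem count_unlock_combinations_spec : Claim_equal_count_unlock_combinations := by
  intro N a b c _
  unfold Spec_count_unlock_combinations count_unlock_combinations count_unlock_combinations_alt
  set R := PySem.List.pyRange 1 (N + 1) 1 with hR
  set L : Int := (R.length : Int) with hL
  have hLmax : L = max N 0 := pv_length_range N
  have Ha := pv_hit_count_int N a
  have Hb := pv_hit_count_int N b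
  have Hc := pv_hit_count_int N c
  rw [← hR] at Ha Hb Hc
  -- innermost loop
  have step1 : ∀ (x y cnt : Int),
      R.foldl (fun cnt z => if pvWithin x a || pvWithin y b || pvWithin z c then cnt + 1 else cnt) cnt
        = cnt + (if pvWithin x a || pvWithin y b then L else pvHit N c) := by
    intro x y cnt
    rw [pv_foldl_count (fun z => pvWithin x a || pvWithin y b || pvWithin z c) R cnt]
    have := pv_countP_or (pvWithin x a || pvWithin y b) (fun z => pvWithin z c) R
    simp only [Bool.or_assoc] at this ⊢
    rw [this]
    by_cases h : pvWithin x a || pvWithin y b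
    · simp only [Bool.or_assoc] at h
      simp [h, hL]
    · simp only [Bool.or_assoc] at h
      simp [h, Hc]
  -- middle loop
  have step2 : ∀ (x cnt : Int),
      R.foldl (fun cnt y =>
        R.foldl (fun cnt z => if pvWithin x a || pvWithin y b || pvWithin z c then cnt + 1 else cnt) cnt) cnt
        = cnt + (if pvWithin x a then L * L
                 else pvHit N b * L + (L - pvHit N b) * pvHit N c) := by
    intro x cnt
    rw [pv_foldl_ext _ (fun cnt y => cnt + (if pvWithin x a || pvWithin y b then L else pvHit N c))
        (fun cnt y => step1 x y cnt) R cnt]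
    rw [pv_foldl_ext _ (fun cnt y => cnt + (if (fun y => pvWithin x a || pvWithin y b) y then L else pvHit N c))
        (fun cnt y => rfl) R cnt]
    rw [pv_foldl_ite_sum (fun y => pvWithin x a || pvWithin y b) L (pvHit N c) R cnt]
    rw [pv_countP_or (pvWithin x a) (fun y => pvWithin y b) R]
    by_cases h : pvWithin x a
    · simp only [h, if_true, ← hL]
      ring
    · simp [h, Hb]
      ring
  -- outer loop
  rw [pv_foldl_ext _ (fun cnt x => cnt + (if pvWithin x a then L * L
        else pvHit N b * L + (L - pvHit N b) * pvHit N c))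
      (fun cnt x => step2 x cnt) R 0]
  rw [pv_foldl_ite_sum (fun x => pvWithin x a) (L * L)
      (pvHit N b * L + (L - pvHit N b) * pvHit N c) R 0]
  rw [Ha, ← hL, ← hLmax]
  ring
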